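-- pv_equiv track=rewrite | github.com/FrMohande/Cours | Codage/tp3/codage64.py | symbols_to_bytes
-- ===== SOURCE A (Python) =====
-- BASE64_SYMBOLS = ['A', 'B', 'C', 'D', 'E', 'F', 'G', 'H', 'I', 'J', 'K', 'L', 'M', 'N', 'O', 'P', 'Q',
--                   'R', 'S', 'T', 'U', 'V', 'W', 'X', 'Y', 'Z', 'a', 'b', 'c', 'd', 'e', 'f', 'g', 'h',
--                   'i', 'j', 'k', 'l', 'm', 'n', 'o', 'p', 'q', 'r', 's', 't', 'u', 'v', 'w', 'x', 'y',
--                   'z', '0', '1', '2', '3', '4', '5', '6', '7', '8', '9', '+', '/']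
--
-- def decode_base64_symbol(symbol):
--     assert(symbol in BASE64_SYMBOLS) , "decode_base64_symbol: the symbol is not part of base64"
--     for i in range(len(BASE64_SYMBOLS)):
--         if BASE64_SYMBOLS[i] == symbol:
--             return i
--
-- def symbols_to_bytes(symbols):
--     '''Convert base64 symbols to bytes
--     Parameters:	symbols (str) – a string of four base64 symbols (plus the =)
--     Returns:	a list of one to 3 bytes whose values correspond to the base64 symbols
--     Return type:	list
--     CU:	len(symbols) == 4'''
--     cpt = 0
--     for c in symbols:
--         if c == '=':
--             cpt = cpt + 1
--     if cpt == 0 :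
--         ''' aucun ='''
--         data1 = decode_base64_symbol(symbols[0])
--         data2 = decode_base64_symbol(symbols[1])
--         data3 = decode_base64_symbol(symbols[2])
--         data4 = decode_base64_symbol(symbols[3])
--         temp1 = (data2 & 15) << 4
--         temp2 = (data3 & 3) << 6
--         retour = [(data1 << 2) + (data2 >> 4), temp1 + (data3 >> 2), temp2 + data4 ]
--     if cpt == 1 :
--         ''' ='''
--         data1 = decode_base64_symbol(symbols[0])
--         data2 = decode_base64_symbol(symbols[1])
--         data3 = decode_base64_symbol(symbols[2])
--         temp1 = (data2 & 15) << 4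
--         retour = [ (data1 << 2) + (data2 >>4),temp1 + (data3>>2)]
--     if cpt == 2:
--         '''== '''
--         data1 = decode_base64_symbol(symbols[0])
--         data2 = decode_base64_symbol(symbols[1])
--         retour = [(data1 << 2) + (data2 >> 4)]
--     return retour
-- ===== SOURCE B (Python) =====
-- _B64 = list('ABCDEFGHIJKLMNOPQRSTUVWXYZabcdefghijklmnopqrstuvwxyz0123456789+/')
--
-- def symbols_to_bytes(symbols):
--     cpt = symbols.count('=')
--     v = 0
--     for i in range(4 - cpt):
--         v = v * 64 + _B64.index(symbols[i])
--     v = v * 64 ** cpt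
--     return [v // 65536 % 256, v // 256 % 256, v % 256][:3 - cpt]
-- ===== Notes on version B (the rewrite author's own statement) =====
-- stated objective: simpler
-- what changed: A counts '=' with a Python loop and then runs one of three copy-pasted branches of per-symbol shift/mask arithmetic; B uses str.count, folds the decoded 6-bit values of the first 4-cpt symbols into one packed integer, and slices the extracted bytes to length 3-cpt, with a table .index replacing A's hand-written linear search.
import Mathlib
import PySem

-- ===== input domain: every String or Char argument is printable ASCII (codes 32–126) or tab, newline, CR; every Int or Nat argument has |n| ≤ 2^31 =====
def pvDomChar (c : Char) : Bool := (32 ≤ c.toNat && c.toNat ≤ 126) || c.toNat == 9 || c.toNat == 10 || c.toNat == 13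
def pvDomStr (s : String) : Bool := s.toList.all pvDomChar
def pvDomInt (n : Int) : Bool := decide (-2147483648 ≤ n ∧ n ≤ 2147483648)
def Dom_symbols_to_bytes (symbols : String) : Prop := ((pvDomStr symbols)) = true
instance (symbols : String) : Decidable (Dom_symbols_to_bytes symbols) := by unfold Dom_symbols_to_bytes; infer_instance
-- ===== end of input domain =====

-- B replaces A's three copy-pasted shift-and-mask branches by one fold packing the 6-bit values
-- into a single 24-bit integer and slicing the extracted bytes (objective: simpler).


-- ===== PORT A =====
def BASE64_SYMBOLS : List Char :=
  ['A', 'B', 'C', 'D', 'E', 'F', 'G', 'H', 'I', 'J', 'K', 'L', 'M', 'N', 'O', 'P', 'Q',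
   'R', 'S', 'T', 'U', 'V', 'W', 'X', 'Y', 'Z', 'a', 'b', 'c', 'd', 'e', 'f', 'g', 'h',
   'i', 'j', 'k', 'l', 'm', 'n', 'o', 'p', 'q', 'r', 's', 't', 'u', 'v', 'w', 'x', 'y',
   'z', '0', '1', '2', '3', '4', '5', '6', '7', '8', '9', '+', '/']

-- 'for i in range(len(BASE64_SYMBOLS)): if BASE64_SYMBOLS[i] == symbol: return i' as the same
-- linear scan carrying the running index; [] = the loop falls through (Python returns None there,
-- unreachable for the symbols Pre_ admits), ported as 0.
def decodeGo (symbol : Char) (i : Int) : List Char → Int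
  | [] => 0
  | c :: rest => if c == symbol then i else decodeGo symbol (i + 1) rest

def decode_base64_symbol (symbol : Char) : Int := decodeGo symbol 0 BASE64_SYMBOLS

-- symbols[k] ported via pyGet?; .getD 'A' covers the IndexError case, which Pre_ excludes.
def symbols_to_bytes (symbols : String) : List Int :=
  let cs := symbols.toList
  let cpt : Int := cs.foldl (fun cpt c => if c == '=' then cpt + 1 else cpt) 0
  if cpt == 0 then
    let data1 := decode_base64_symbol ((PySem.List.pyGet? cs 0).getD 'A')
    let data2 := decode_base64_symbol ((PySem.List.pyGet? cs 1).getD 'A')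
    let data3 := decode_base64_symbol ((PySem.List.pyGet? cs 2).getD 'A')
    let data4 := decode_base64_symbol ((PySem.List.pyGet? cs 3).getD 'A')
    let temp1 := (PySem.Int.band data2 15) <<< (4:Nat)
    let temp2 := (PySem.Int.band data3 3) <<< (6:Nat)
    [(data1 <<< (2:Nat)) + (data2 >>> (4:Nat)), temp1 + (data3 >>> (2:Nat)), temp2 + data4]
  else if cpt == 1 then
    let data1 := decode_base64_symbol ((PySem.List.pyGet? cs 0).getD 'A')
    let data2 := decode_base64_symbol ((PySem.List.pyGet? cs 1).getD 'A')
    let data3 := decode_base64_symbol ((PySem.List.pyGet? cs 2).getD 'A')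
    let temp1 := (PySem.Int.band data2 15) <<< (4:Nat)
    [(data1 <<< (2:Nat)) + (data2 >>> (4:Nat)), temp1 + (data3 >>> (2:Nat))]
  else if cpt == 2 then
    let data1 := decode_base64_symbol ((PySem.List.pyGet? cs 0).getD 'A')
    let data2 := decode_base64_symbol ((PySem.List.pyGet? cs 1).getD 'A')
    [(data1 <<< (2:Nat)) + (data2 >>> (4:Nat))]
  else []  -- cpt ≥ 3: Python raises UnboundLocalError ('retour' never assigned); Pre_ excludes this

-- ===== PORT B =====
-- Source B's module constant _B64 = list('ABC…/'), as its list of characters.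
def pvB64Table : List Char :=
  ['A', 'B', 'C', 'D', 'E', 'F', 'G', 'H', 'I', 'J', 'K', 'L', 'M', 'N', 'O', 'P', 'Q',
   'R', 'S', 'T', 'U', 'V', 'W', 'X', 'Y', 'Z', 'a', 'b', 'c', 'd', 'e', 'f', 'g', 'h',
   'i', 'j', 'k', 'l', 'm', 'n', 'o', 'p', 'q', 'r', 's', 't', 'u', 'v', 'w', 'x', 'y',
   'z', '0', '1', '2', '3', '4', '5', '6', '7', '8', '9', '+', '/']

-- _B64.index(c) raises ValueError when c is absent and symbols[i] IndexError when too short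
-- (both excluded by Pre_); the .getD defaults cover those cases.
def symbols_to_bytes_alt (symbols : String) : List Int :=
  let cpt : Int := (PySem.Str.count symbols "=" : Nat)
  let v : Int := (PySem.List.pyRange 0 (4 - cpt) 1).foldl
    (fun v i => v * 64 +
      (((PySem.List.index? pvB64Table
          ((PySem.List.pyGet? symbols.toList i).getD 'A')).getD 0 : Nat) : Int)) 0
  let v := v * 64 ^ cpt.toNat  -- v * 64 ** cpt (cpt = a count, always ≥ 0)
  PySem.List.slice [PySem.Int.mod (PySem.Int.floordiv v 65536) 256,
                    PySem.Int.mod (PySem.Int.floordiv v 256) 256,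
                    PySem.Int.mod v 256] none (some (3 - cpt))

-- ===== PRECONDITION & SPEC =====
-- Exactly the inputs on which A returns: at most two '=' (with three or more, A's 'retour' is
-- never assigned and A raises UnboundLocalError), the string long enough that the 4 - cpt
-- indexed positions exist (else IndexError), and those positions holding base64 symbols
-- (else A's assert fails).
def Pre_symbols_to_bytes (symbols : String) : Prop :=
  symbols.toList.count '=' ≤ 2 ∧
  4 - symbols.toList.count '=' ≤ symbols.toList.length ∧
  ((symbols.toList.take (4 - symbols.toList.count '=')).all
      (fun c => BASE64_SYMBOLS.contains c)) = true
instance (symbols : String) : Decidable (Pre_symbols_to_bytes symbols) := by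
  unfold Pre_symbols_to_bytes; infer_instance
def pvWitness_symbols_to_bytes : String := "TWFu"

def Spec_symbols_to_bytes (symbols : String) (out : List Int) : Prop := out = symbols_to_bytes_alt symbols
instance (symbols : String) (out : List Int) : Decidable (Spec_symbols_to_bytes symbols out) := by
  unfold Spec_symbols_to_bytes; infer_instance

-- ===== CLAIM (what is proved, stated in full; the proofs are below) =====
def Claim_equal_symbols_to_bytes : Prop := ∀ (symbols : String), Dom_symbols_to_bytes symbols → Pre_symbols_to_bytes symbols → Spec_symbols_to_bytes symbols (symbols_to_bytes symbols)

-- ===== LEMMAS AND PROOFS =====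

-- PySem.Chars.count.go on a single-character needle is List.count (fuel induction).
theorem countGo_single (c : Char) : ∀ (fuel : Nat) (s : List Char) (acc : Nat), s.length ≤ fuel →
    PySem.Chars.count.go [c] fuel s acc = acc + s.count c := by
  intro fuel
  induction fuel with
  | zero =>
    intro s acc h
    cases s with
    | nil => simp [PySem.Chars.count.go]
    | cons hd t => simp at h
  | succ n ih =>
    intro s acc h
    cases s with
    | nil => simp [PySem.Chars.count.go]
    | cons hd t =>
      simp only [PySem.Chars.count.go]
      by_cases hc : c = hd
      · subst hc
        simp [List.isPrefixOf, ih t (acc + 1) (by simpa using h)]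
        omega
      · simp [List.isPrefixOf, Ne.symm hc, hc, ih t acc (by simpa using h)]

-- str.count with a one-character needle counts that character.
theorem str_count_single (s : String) : PySem.Str.count s "=" = s.toList.count '=' := by
  have h1 : PySem.Chars.count s.toList ['='] = s.toList.count '=' := by
    simp [PySem.Chars.count]
    simpa using countGo_single '=' s.toList.length s.toList 0 le_rfl
  simpa [pysem] using h1

-- A's linear scan from running index i returns i + the index of the first match.
theorem decodeGo_eq (c : Char) : ∀ (l : List Char) (i : Int), c ∈ l →
    decodeGo c i l = i + (l.idxOf c : Int) := by
  intro l
  induction l with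
  | nil => intro i h; simp at h
  | cons hd t ih =>
    intro i h
    by_cases hc : hd = c
    · subst hc; simp [decodeGo, List.idxOf_cons_self]
    · have hm : c ∈ t := by
        rcases List.mem_cons.1 h with h' | h'
        · exact absurd h'.symm hc
        · exact h'
      simp [decodeGo, hc, ih (i + 1) hm, List.idxOf_cons_ne _ hc]
      ring

theorem idxOf?_eq_some_idxOf (l : List Char) (c : Char) (h : c ∈ l) :
    l.idxOf? c = some (l.idxOf c) := by
  induction l with
  | nil => simp at h
  | cons hd t ih =>
    by_cases hc : hd = c
    · subst hc; simp [List.idxOf?_cons, List.idxOf_cons_self]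
    · rcases List.mem_cons.1 h with h' | h'
      · exact absurd h'.symm hc
      · simp [List.idxOf?_cons, List.idxOf_cons_ne, hc, ih h']

-- For every admitted symbol, A's linear scan and B's table index agree and yield a 6-bit value.
theorem decode_table : ∀ c ∈ BASE64_SYMBOLS,
    decodeGo c 0 BASE64_SYMBOLS = (((pvB64Table.idxOf? c).getD 0 : Nat) : Int) ∧
    0 ≤ decodeGo c 0 BASE64_SYMBOLS ∧ decodeGo c 0 BASE64_SYMBOLS < 64 := by
  intro c hc
  have htab : pvB64Table = BASE64_SYMBOLS := rfl
  have hlen : BASE64_SYMBOLS.length = 64 := rfl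
  rw [decodeGo_eq c BASE64_SYMBOLS 0 hc, htab, idxOf?_eq_some_idxOf _ _ hc]
  have hlt := List.idxOf_lt_length_of_mem hc
  refine ⟨by simp, by positivity, ?_⟩
  simp only [zero_add]
  exact_mod_cast hlen ▸ hlt

theorem band_16 (b : Int) (h : 0 ≤ b) : PySem.Int.band b 15 = b % 16 := by
  rw [PySem.Int.band_of_nonneg h (by norm_num)]
  have h2 : b.toNat &&& (15:Int).toNat = b.toNat % 16 := by
    have := Nat.and_two_pow_sub_one_eq_mod b.toNat 4; norm_num at this
    simpa using this
  rw [h2]; omega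

theorem band_4 (b : Int) (h : 0 ≤ b) : PySem.Int.band b 3 = b % 4 := by
  rw [PySem.Int.band_of_nonneg h (by norm_num)]
  have h2 : b.toNat &&& (3:Int).toNat = b.toNat % 4 := by
    have := Nat.and_two_pow_sub_one_eq_mod b.toNat 2; norm_num at this
    simpa using this
  rw [h2]; omega

theorem slice3i (x y z : Int) : PySem.List.slice [x, y, z] none (some 3) = [x, y, z] := rfl
theorem slice2i (x y z : Int) : PySem.List.slice [x, y, z] none (some 2) = [x, y] := rfl
theorem slice1i (x y z : Int) : PySem.List.slice [x, y, z] none (some 1) = [x] := rfl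

-- The three byte equations between A's masks/shifts and B's packed 24-bit integer.
theorem byte1 (a b c d : Int) (ha : 0 ≤ a ∧ a < 64) (hb : 0 ≤ b ∧ b < 64)
    (hc : 0 ≤ c ∧ c < 64) (hd : 0 ≤ d ∧ d < 64) :
    (a <<< (2:Nat)) + (b >>> (4:Nat))
      = (((a * 64 + b) * 64 + c) * 64 + d) / 65536 % 256 := by
  rw [Int.shiftRight_eq_div_pow, Int.shiftLeft_eq]
  norm_num; omega

theorem byte2 (a b c d : Int) (hb : 0 ≤ b ∧ b < 64)
    (hc : 0 ≤ c ∧ c < 64) (hd : 0 ≤ d ∧ d < 64) :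
    ((PySem.Int.band b 15) <<< (4:Nat)) + (c >>> (2:Nat))
      = (((a * 64 + b) * 64 + c) * 64 + d) / 256 % 256 := by
  rw [Int.shiftRight_eq_div_pow, Int.shiftLeft_eq, band_16 b hb.1]
  norm_num; omega

theorem byte3 (a b c d : Int) (hc : 0 ≤ c ∧ c < 64) (hd : 0 ≤ d ∧ d < 64) :
    ((PySem.Int.band c 3) <<< (6:Nat)) + d
      = (((a * 64 + b) * 64 + c) * 64 + d) % 256 := by
  rw [Int.shiftLeft_eq, band_4 c hc.1]
  norm_num; omega

theorem byte1_pad1 (a b c : Int) (ha : 0 ≤ a ∧ a < 64) (hb : 0 ≤ b ∧ b < 64)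
    (hc : 0 ≤ c ∧ c < 64) :
    (a <<< (2:Nat)) + (b >>> (4:Nat)) = ((a * 64 + b) * 64 + c) * 64 / 65536 % 256 := by
  have h := byte1 a b c 0 ha hb hc ⟨by norm_num, by norm_num⟩
  simpa using h

theorem byte2_pad1 (a b c : Int) (hb : 0 ≤ b ∧ b < 64) (hc : 0 ≤ c ∧ c < 64) :
    ((PySem.Int.band b 15) <<< (4:Nat)) + (c >>> (2:Nat))
      = ((a * 64 + b) * 64 + c) * 64 / 256 % 256 := by
  have h := byte2 a b c 0 hb hc ⟨by norm_num, by norm_num⟩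
  simpa using h

theorem byte1_pad2 (a b : Int) (ha : 0 ≤ a ∧ a < 64) (hb : 0 ≤ b ∧ b < 64) :
    (a <<< (2:Nat)) + (b >>> (4:Nat)) = (a * 64 + b) * 4096 / 65536 % 256 := by
  have h := byte1 a b 0 0 ha hb ⟨by norm_num, by norm_num⟩ ⟨by norm_num, by norm_num⟩
  rw [show ((a * 64 + b) : Int) * 4096 = ((a * 64 + b) * 64 + 0) * 64 + 0 by ring]
  simpa using h

-- ===== VERDICT (by name: the statement is the Claim_ definition above) =====
theorem symbols_to_bytes_spec : Claim_equal_symbols_to_bytes := by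
  intro s _ pre
  obtain ⟨h1, h2, h3b⟩ := pre
  have h3 : ∀ c ∈ s.toList.take (4 - s.toList.count '='), c ∈ BASE64_SYMBOLS := by
    simpa [List.all_eq_true, List.contains_iff_mem] using h3b
  clear h3b
  show symbols_to_bytes s = symbols_to_bytes_alt s
  simp only [symbols_to_bytes, symbols_to_bytes_alt, str_count_single s,
             PySem.List.foldl_beq_add_one]
  generalize hg : s.toList = cs at h1 h2 h3 ⊢
  have hk : cs.count '=' = 0 ∨ cs.count '=' = 1 ∨ cs.count '=' = 2 := by omega
  rcases hk with hk | hk | hk <;> rw [hk] at h2 h3 ⊢ <;> norm_num at h2 h3 ⊢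
  · -- cpt = 0
    rcases cs with _ | ⟨c0, _ | ⟨c1, _ | ⟨c2, _ | ⟨c3, t⟩⟩⟩⟩ <;> simp at h2 h3 ⊢
    obtain ⟨e0, lb0, ub0⟩ := decode_table c0 h3.1
    obtain ⟨e1, lb1, ub1⟩ := decode_table c1 h3.2.1
    obtain ⟨e2, lb2, ub2⟩ := decode_table c2 h3.2.2.1
    obtain ⟨e3, lb3, ub3⟩ := decode_table c3 h3.2.2.2
    rw [show PySem.List.pyRange 0 4 = [0, 1, 2, 3] from rfl, slice3i]
    simp only [List.foldl_cons, List.foldl_nil, decode_base64_symbol]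
    have g0 : (PySem.List.pyGet? (c0 :: c1 :: c2 :: c3 :: t) 0).getD 'A' = c0 := by simp [pysem]
    have g1 : (PySem.List.pyGet? (c0 :: c1 :: c2 :: c3 :: t) 1).getD 'A' = c1 := by simp [pysem]
    have g2 : (PySem.List.pyGet? (c0 :: c1 :: c2 :: c3 :: t) 2).getD 'A' = c2 := by simp [pysem]
    have g3 : (PySem.List.pyGet? (c0 :: c1 :: c2 :: c3 :: t) 3).getD 'A' = c3 := by simp [pysem]
    rw [g0, g1, g2, g3, ← e0, ← e1, ← e2, ← e3]
    simp only [zero_mul, zero_add, List.cons.injEq, and_true]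
    exact ⟨byte1 _ _ _ _ ⟨lb0, ub0⟩ ⟨lb1, ub1⟩ ⟨lb2, ub2⟩ ⟨lb3, ub3⟩,
           byte2 _ _ _ _ ⟨lb1, ub1⟩ ⟨lb2, ub2⟩ ⟨lb3, ub3⟩,
           byte3 _ _ _ _ ⟨lb2, ub2⟩ ⟨lb3, ub3⟩⟩
  · -- cpt = 1
    rcases cs with _ | ⟨c0, _ | ⟨c1, _ | ⟨c2, t⟩⟩⟩ <;> simp at h2 h3 ⊢
    obtain ⟨e0, lb0, ub0⟩ := decode_table c0 h3.1
    obtain ⟨e1, lb1, ub1⟩ := decode_table c1 h3.2.1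
    obtain ⟨e2, lb2, ub2⟩ := decode_table c2 h3.2.2
    rw [show PySem.List.pyRange 0 3 = [0, 1, 2] from rfl, slice2i]
    simp only [List.foldl_cons, List.foldl_nil, decode_base64_symbol]
    have g0 : (PySem.List.pyGet? (c0 :: c1 :: c2 :: t) 0).getD 'A' = c0 := by simp [pysem]
    have g1 : (PySem.List.pyGet? (c0 :: c1 :: c2 :: t) 1).getD 'A' = c1 := by simp [pysem]
    have g2 : (PySem.List.pyGet? (c0 :: c1 :: c2 :: t) 2).getD 'A' = c2 := by simp [pysem]
    rw [g0, g1, g2, ← e0, ← e1, ← e2]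
    simp only [zero_mul, zero_add, List.cons.injEq, and_true]
    exact ⟨byte1_pad1 _ _ _ ⟨lb0, ub0⟩ ⟨lb1, ub1⟩ ⟨lb2, ub2⟩,
           byte2_pad1 _ _ _ ⟨lb1, ub1⟩ ⟨lb2, ub2⟩⟩
  · -- cpt = 2
    rcases cs with _ | ⟨c0, _ | ⟨c1, t⟩⟩ <;> simp at h2 h3 ⊢
    obtain ⟨e0, lb0, ub0⟩ := decode_table c0 h3.1
    obtain ⟨e1, lb1, ub1⟩ := decode_table c1 h3.2
    rw [show PySem.List.pyRange 0 2 = [0, 1] from rfl, slice1i]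
    simp only [List.foldl_cons, List.foldl_nil, decode_base64_symbol]
    have g0 : (PySem.List.pyGet? (c0 :: c1 :: t) 0).getD 'A' = c0 := by simp [pysem]
    have g1 : (PySem.List.pyGet? (c0 :: c1 :: t) 1).getD 'A' = c1 := by simp [pysem]
    rw [g0, g1, ← e0, ← e1]
    simp only [zero_mul, zero_add, List.cons.injEq, and_true]
    exact byte1_pad2 _ _ ⟨lb0, ub0⟩ ⟨lb1, ub1⟩
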